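-- pv_equiv track=rewrite | github.com/rishi-new-atlan/MDLHContextExtractor | discover_schemas.py | find_namespace
-- ===== SOURCE A (Python) =====
-- def find_namespace(namespaces, prefer_gold=False):
--     """Find the right namespace."""
--     for ns in namespaces:
--         ns_str = ".".join(ns)
--         if prefer_gold and "gold" in ns_str.lower():
--             return ns_str
--         if not prefer_gold and ns_str in ("atlan-ns", "entity_metadata"):
--             return ns_str
--     if not prefer_gold:
--         for ns in namespaces:
--             ns_str = ".".join(ns)
--             if "history" not in ns_str and "gold" not in ns_str:
--                 return ns_str
--     return None
-- ===== SOURCE B (Python) =====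
-- def find_namespace(namespaces, prefer_gold=False):
--     """Find the right namespace: one fold keeping the best-ranked candidate."""
--     def rank(s):
--         if prefer_gold:
--             return 0 if "gold" in s.lower() else None
--         if s in ("atlan-ns", "entity_metadata"):
--             return 0
--         if "history" not in s and "gold" not in s:
--             return 1
--         return None
--
--     best = None  # (rank, ns_str); earlier element wins ties via strict <
--     for ns in namespaces:
--         s = ".".join(ns)
--         r = rank(s)
--         if r is not None and (best is None or r < best[0]):
--             best = (r, s)
--     return None if best is None else best[1]
-- ===== Notes on version B (the rewrite author's own statement) =====
-- stated objective: alternative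
-- what changed: B assigns each joined namespace a priority rank (0 = exact/gold match, 1 = history/gold-free fallback) and does one fold keeping the earliest lowest-rank candidate, instead of A's early-return scans run in sequence.
import Mathlib
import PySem

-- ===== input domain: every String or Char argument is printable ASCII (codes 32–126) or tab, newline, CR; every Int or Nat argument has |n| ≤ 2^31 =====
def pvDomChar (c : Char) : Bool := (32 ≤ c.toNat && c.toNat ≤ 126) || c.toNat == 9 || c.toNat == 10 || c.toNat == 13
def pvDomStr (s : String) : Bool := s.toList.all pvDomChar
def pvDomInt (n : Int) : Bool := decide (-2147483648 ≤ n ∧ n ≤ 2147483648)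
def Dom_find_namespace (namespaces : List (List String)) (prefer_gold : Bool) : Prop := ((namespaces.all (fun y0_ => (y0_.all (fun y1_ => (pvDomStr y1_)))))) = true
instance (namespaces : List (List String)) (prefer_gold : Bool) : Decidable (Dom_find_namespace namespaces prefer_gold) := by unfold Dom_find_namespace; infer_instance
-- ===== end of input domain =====

-- B replaces A's sequential early-return scans by one fold that ranks each joined
-- namespace (0 = exact/gold match, 1 = fallback) and keeps the earliest lowest-rank candidate.

-- ===== PORT A =====
-- A's first loop: return ns_str on a (prefer_gold) gold hit or a (non-gold) exact match; none = fell through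
def fnA_loop1 (prefer_gold : Bool) : List (List String) → Option String
  | [] => none
  | ns :: rest =>
    let s := PySem.Str.join "." ns
    if prefer_gold && PySem.Str.isIn "gold" (PySem.Str.lower s) then some s
    else if !prefer_gold && (s == "atlan-ns" || s == "entity_metadata") then some s
    else fnA_loop1 prefer_gold rest

-- A's second loop: first join containing neither "history" nor "gold"
def fnA_loop2 : List (List String) → Option String
  | [] => none
  | ns :: rest =>
    let s := PySem.Str.join "." ns
    if !PySem.Str.isIn "history" s && !PySem.Str.isIn "gold" s then some s
    else fnA_loop2 rest

def find_namespace (namespaces : List (List String)) (prefer_gold : Bool) : Option String :=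
  match fnA_loop1 prefer_gold namespaces with
  | some r => some r
  | none => if !prefer_gold then fnA_loop2 namespaces else none

-- ===== PORT B =====
-- B's rank of a joined namespace string (none = not a candidate)
def fnRank (prefer_gold : Bool) (s : String) : Option Nat :=
  if prefer_gold then
    if PySem.Str.isIn "gold" (PySem.Str.lower s) then some 0 else none
  else if s == "atlan-ns" || s == "entity_metadata" then some 0
  else if !PySem.Str.isIn "history" s && !PySem.Str.isIn "gold" s then some 1
  else none

-- B's fold step: keep the strictly better-ranked candidate (ties keep the earlier one)
def fnB_step (prefer_gold : Bool) (best : Option (Nat × String)) (ns : List String) : Option (Nat × String) :=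
  let s := PySem.Str.join "." ns
  match fnRank prefer_gold s, best with
  | none, b => b
  | some r, none => some (r, s)
  | some r, some (br, bs) => if r < br then some (r, s) else some (br, bs)

def find_namespace_alt (namespaces : List (List String)) (prefer_gold : Bool) : Option String :=
  (namespaces.foldl (fnB_step prefer_gold) none).map Prod.snd

-- ===== PRECONDITION & SPEC =====
def Spec_find_namespace (namespaces : List (List String)) (prefer_gold : Bool) (out : Option String) : Prop := out = find_namespace_alt namespaces prefer_gold
instance (namespaces : List (List String)) (prefer_gold : Bool) (out : Option String) : Decidable (Spec_find_namespace namespaces prefer_gold out) := by unfold Spec_find_namespace; infer_instance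

-- ===== CLAIM (what is proved, stated in full; the proofs are below) =====
def Claim_equal_find_namespace : Prop := ∀ (namespaces : List (List String)) (prefer_gold : Bool), Dom_find_namespace namespaces prefer_gold → Spec_find_namespace namespaces prefer_gold (find_namespace namespaces prefer_gold)

-- ===== LEMMAS AND PROOFS =====

-- a rank-0 accumulator is absorbing for the fold
theorem fold_absorb0 (pg : Bool) (v : String) (l : List (List String)) :
    l.foldl (fnB_step pg) (some (0, v)) = some (0, v) := by
  induction l with
  | nil => rfl
  | cons ns rest ih =>
    simp only [List.foldl_cons, fnB_step]
    cases h : fnRank pg (PySem.Str.join "." ns) with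
    | none => simpa using ih
    | some r => simpa using ih

theorem fold_from1 (v : String) (l : List (List String)) :
    l.foldl (fnB_step false) (some (1, v)) =
      match fnA_loop1 false l with
      | some a => some (0, a)
      | none => some (1, v) := by
  induction l generalizing v with
  | nil => rfl
  | cons ns rest ih =>
    simp only [List.foldl_cons, fnA_loop1, fnB_step, fnRank, Bool.false_and, Bool.not_false,
      Bool.true_and, Bool.false_eq_true, if_false]
    split_ifs with h1 h2 <;> simp [fold_absorb0, ih]

theorem fold_gold (l : List (List String)) :
    l.foldl (fnB_step true) none = (fnA_loop1 true l).map (fun s => (0, s)) := by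
  induction l with
  | nil => rfl
  | cons ns rest ih =>
    simp only [List.foldl_cons, fnA_loop1, fnB_step, fnRank, Bool.true_and, Bool.not_true,
      Bool.false_and, Bool.false_eq_true, if_false]
    split_ifs with h <;> simp [fold_absorb0, ih]

theorem fold_nongold (l : List (List String)) :
    l.foldl (fnB_step false) none =
      match fnA_loop1 false l, fnA_loop2 l with
      | some a, _ => some (0, a)
      | none, some b => some (1, b)
      | none, none => none := by
  induction l with
  | nil => rfl
  | cons ns rest ih =>
    simp only [List.foldl_cons, fnA_loop1, fnA_loop2, fnB_step, fnRank, Bool.false_and,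
      Bool.not_false, Bool.true_and, Bool.false_eq_true, if_false]
    split_ifs
    · simp [fold_absorb0]
    · simp [fold_absorb0]
    · rw [fold_from1]
      cases h : fnA_loop1 false rest <;> simp
    · exact ih

-- ===== VERDICT (by name: the statement is the Claim_ definition above) =====
theorem find_namespace_spec : Claim_equal_find_namespace := by
  intro namespaces prefer_gold _
  unfold Spec_find_namespace find_namespace find_namespace_alt
  cases prefer_gold with
  | true =>
    rw [fold_gold]
    cases h : fnA_loop1 true namespaces <;> simp
  | false =>
    rw [fold_nongold]
    cases h1 : fnA_loop1 false namespaces <;> cases h2 : fnA_loop2 namespaces <;> simp
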